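-- pv_equiv track=rewrite | github.com/gfmortega/abakoda-2023-long-solutions | M2/kevin.py | cutc
-- ===== SOURCE A (Python) =====
-- from itertools import chain, combinations, product
--
-- dijs = [(i, j) for i in (-1, 0, +1) for j in (-1, 0, +1) if abs(i) + abs(j) == 1]
--
-- def cutc(grid):
--     r, [c] = len(grid), {*map(len, grid)}
--     if len(poss := {grid[i][j]: (i, j) for i, j in chain(
--             ((i, j) for i in range(r) for j in (0, c-1)),
--             ((i, j) for j in range(c) for i in (0, r-1)),
--         )}) != 2: return
--     vis = [[False]*c for i in range(r)]
--     for v, (i, j) in poss.items():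
--         vis[i][j] = True
--         stak = [(i, j)]
--         while stak:
--             i, j = stak.pop()
--             for di, dj in dijs:
--                 if 0 <= (ni := i + di) < r and 0 <= (nj := j + dj) < c and grid[ni][nj] == v and not vis[ni][nj]:
--                     vis[ni][nj] = True
--                     stak.append((ni, nj))
--     if not all(all(row) for row in vis): return
--     return 1 + sum(
--         sum(grid[i + di][j + dj] != grid[i][j] for di in (0, 1) for dj in (0, 1)) & 1
--         for i in range(r - 1)
--         for j in range(c - 1)
--     )
-- ===== SOURCE B (Python) =====
-- def cutc(grid):
--     r = len(grid)
--     c, = set(map(len, grid))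
--     border = {}
--     for i in range(r):
--         for j in (0, c - 1):
--             border[grid[i][j]] = (i, j)
--     for j in range(c):
--         for i in (0, r - 1):
--             border[grid[i][j]] = (i, j)
--     if len(border) != 2:
--         return None
--     vis = [[False] * c for _ in range(r)]
--     for (i, j) in border.values():
--         vis[i][j] = True
--     # round-based label propagation instead of DFS: sweep the whole grid,
--     # marking any unmarked cell with a marked 4-neighbour of the same value,
--     # until a sweep changes nothing.
--     changed = True
--     while changed:
--         changed = False
--         for i in range(r):
--             for j in range(c):
--                 if not vis[i][j]:
--                     for di, dj in ((-1, 0), (0, -1), (0, 1), (1, 0)):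
--                         ni, nj = i + di, j + dj
--                         if 0 <= ni < r and 0 <= nj < c and vis[ni][nj] and grid[ni][nj] == grid[i][j]:
--                             vis[i][j] = True
--                             changed = True
--                             break
--     if not all(all(row) for row in vis):
--         return None
--     return 1 + sum(
--         sum(grid[i + di][j + dj] != grid[i][j] for di in (0, 1) for dj in (0, 1)) & 1
--         for i in range(r - 1)
--         for j in range(c - 1)
--     )
-- ===== Notes on version B (the rewrite author's own statement) =====
-- stated objective: alternative
-- what changed: The per-value DFS flood fill with an explicit stack is replaced by seeding both border representatives at once and running whole-grid label-propagation sweeps (mark any unmarked cell with a marked same-valued 4-neighbour) until a sweep changes nothing; the border dict is built by explicit loops instead of a comprehension over chain.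
import Mathlib
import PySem

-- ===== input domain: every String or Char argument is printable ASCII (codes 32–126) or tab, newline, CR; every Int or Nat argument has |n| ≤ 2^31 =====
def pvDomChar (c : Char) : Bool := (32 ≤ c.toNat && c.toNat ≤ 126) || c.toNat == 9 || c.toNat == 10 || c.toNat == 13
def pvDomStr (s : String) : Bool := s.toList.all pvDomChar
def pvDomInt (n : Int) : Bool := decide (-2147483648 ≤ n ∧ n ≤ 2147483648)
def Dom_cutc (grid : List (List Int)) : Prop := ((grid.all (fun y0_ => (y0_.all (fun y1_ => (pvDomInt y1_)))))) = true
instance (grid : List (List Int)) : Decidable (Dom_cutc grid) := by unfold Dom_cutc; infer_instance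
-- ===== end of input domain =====

-- B replaces A's per-value stack-DFS flood fill by whole-grid label-propagation sweeps to a
-- fixpoint from both border seeds at once (alternative algorithm, no speed claim).

-- shared small helpers (grid/visited access; Python's grid[i][j] is only read in-bounds)
def gval (grid : List (List Int)) (i j : Nat) : Int := (grid.getD i []).getD j 0
def vget (vis : List (List Bool)) (i j : Nat) : Bool := (vis.getD i []).getD j false
def vset (vis : List (List Bool)) (i j : Nat) : List (List Bool) :=
  vis.set i ((vis.getD i []).set j true)
def dijs : List (Int × Int) := [(-1, 0), (0, -1), (0, 1), (1, 0)]

-- ===== PORT A =====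
-- border coordinates, in the chain order of A's dict comprehension
def borderA (r c : Nat) : List (Nat × Nat) :=
  (List.range r).flatMap (fun i => [(i, 0), (i, c - 1)]) ++
  (List.range c).flatMap (fun j => [(0, j), (r - 1, j)])

def possOf (grid : List (List Int)) (coords : List (Nat × Nat)) : PySem.Dict Int (Nat × Nat) :=
  coords.foldl (fun d p => d.insert (gval grid p.1 p.2) p) PySem.Dict.empty

-- one direction of A's inner `for di, dj in dijs` loop
def floodStep (grid : List (List Int)) (r c : Nat) (v : Int) (i j : Nat)
    (s : List (List Bool) × List (Nat × Nat)) (d : Int × Int) :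
    List (List Bool) × List (Nat × Nat) :=
  let ni : Int := (i : Int) + d.1
  let nj : Int := (j : Int) + d.2
  if 0 ≤ ni ∧ ni < (r : Int) ∧ 0 ≤ nj ∧ nj < (c : Int) ∧
      gval grid ni.toNat nj.toNat = v ∧ vget s.1 ni.toNat nj.toNat = false then
    (vset s.1 ni.toNat nj.toNat, (ni.toNat, nj.toNat) :: s.2)
  else s

-- A's `while stak` loop; fuel only bounds the iterations (2*falseCount+|stack| strictly drops)
def floodA (grid : List (List Int)) (r c : Nat) (v : Int) :
    Nat → List (List Bool) → List (Nat × Nat) → List (List Bool)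
  | _, vis, [] => vis
  | 0, vis, _ => vis
  | fuel + 1, vis, (i, j) :: rest =>
      let s := dijs.foldl (floodStep grid r c v i j) (vis, rest)
      floodA grid r c v fuel s.1 s.2

def cutc (grid : List (List Int)) : Option Int :=
  let r := grid.length
  match PySem.Set.ofList (grid.map (fun row => row.length)) with
  | [c] =>
    let poss := possOf grid (borderA r c)
    if poss.size ≠ 2 then none else
    let vis0 : List (List Bool) := List.replicate r (List.replicate c false)
    let vis := poss.items.foldl
      (fun vis kv => floodA grid r c kv.1 (2 * r * c + 1) (vset vis kv.2.1 kv.2.2)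
        [(kv.2.1, kv.2.2)]) vis0
    if vis.all (fun row => row.all id) then
      some (1 + ((List.range (r - 1)).map (fun i => ((List.range (c - 1)).map (fun j =>
        PySem.Int.band (((([(0, 0), (0, 1), (1, 0), (1, 1)] : List (Nat × Nat)).countP
          (fun d => gval grid (i + d.1) (j + d.2) ≠ gval grid i j) : Nat) : Int)) 1)).sum)).sum)
    else none
  | _ => none

-- ===== PORT B =====
-- B's border dict, built by the two explicit loops
def possB (grid : List (List Int)) (r c : Nat) : PySem.Dict Int (Nat × Nat) :=
  let d := (List.range r).foldl
    (fun d i => [((i : Nat), (0 : Nat)), (i, c - 1)].foldl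
      (fun d p => d.insert (gval grid p.1 p.2) p) d) PySem.Dict.empty
  (List.range c).foldl
    (fun d j => [((0 : Nat), (j : Nat)), (r - 1, j)].foldl
      (fun d p => d.insert (gval grid p.1 p.2) p) d) d

-- row-major cell order of B's sweep
def cells (r c : Nat) : List (Nat × Nat) :=
  (List.range r).flatMap (fun i => (List.range c).map (fun j => (i, j)))

-- one cell of B's sweep: mark if unmarked and some in-bounds same-valued neighbour is marked
abbrev markCond (grid : List (List Int)) (r c : Nat) (vis : List (List Bool))
    (p : Nat × Nat) : Prop :=
  vget vis p.1 p.2 = false ∧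
    (∃ d ∈ dijs, 0 ≤ (p.1 : Int) + d.1 ∧ (p.1 : Int) + d.1 < (r : Int) ∧
      0 ≤ (p.2 : Int) + d.2 ∧ (p.2 : Int) + d.2 < (c : Int) ∧
      vget vis ((p.1 : Int) + d.1).toNat ((p.2 : Int) + d.2).toNat = true ∧
      gval grid ((p.1 : Int) + d.1).toNat ((p.2 : Int) + d.2).toNat = gval grid p.1 p.2)

def passStep (grid : List (List Int)) (r c : Nat)
    (s : List (List Bool) × Bool) (p : Nat × Nat) : List (List Bool) × Bool :=
  if markCond grid r c s.1 p then (vset s.1 p.1 p.2, true) else s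

-- B's `while changed` loop; fuel only bounds the sweeps (falseCount drops each changed sweep)
def relaxB (grid : List (List Int)) (r c : Nat) : Nat → List (List Bool) → List (List Bool)
  | 0, vis => vis
  | fuel + 1, vis =>
      let s := (cells r c).foldl (passStep grid r c) (vis, false)
      if s.2 then relaxB grid r c fuel s.1 else s.1

def cutc_alt (grid : List (List Int)) : Option Int :=
  let r := grid.length
  let lens := PySem.Set.ofList (grid.map (fun row => row.length))
  if hl : lens.length = 1 then
    let c := lens.headD 0
    let poss := possB grid r c
    if poss.size ≠ 2 then none else
    let seeds := poss.values.foldl (fun vis p => vset vis p.1 p.2)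
      (List.replicate r (List.replicate c false))
    let vis := relaxB grid r c (r * c + 1) seeds
    if vis.all (fun row => row.all id) then
      some (1 + ((List.range (r - 1)).map (fun i => ((List.range (c - 1)).map (fun j =>
        PySem.Int.band (((([(0, 0), (0, 1), (1, 0), (1, 1)] : List (Nat × Nat)).countP
          (fun d => gval grid (i + d.1) (j + d.2) ≠ gval grid i j) : Nat) : Int)) 1)).sum)).sum)
    else none
  else none

-- ===== PRECONDITION & SPEC =====
-- Pre_ excludes exactly the inputs on which Python A raises: the empty grid and ragged grids
-- (the unpacking `r, [c] = len(grid), {*map(len, grid)}` needs exactly one row length) and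
-- grids whose rows are empty (grid[i][c-1] is an IndexError then).
def Pre_cutc (grid : List (List Int)) : Prop :=
  0 < grid.length ∧ 0 < (grid.headD []).length ∧
    ∀ row ∈ grid, row.length = (grid.headD []).length
instance (grid : List (List Int)) : Decidable (Pre_cutc grid) := by
  unfold Pre_cutc; infer_instance

def pvWitness_cutc : List (List Int) := [[1, 2], [1, 2]]

def Spec_cutc (grid : List (List Int)) (out : Option Int) : Prop := out = cutc_alt grid
instance (grid : List (List Int)) (out : Option Int) : Decidable (Spec_cutc grid out) := by
  unfold Spec_cutc; infer_instance

-- ===== CLAIM (what is proved, stated in full; the proofs are below) =====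
def Claim_equal_cutc : Prop :=
  ∀ (grid : List (List Int)), Dom_cutc grid → Pre_cutc grid → Spec_cutc grid (cutc grid)

-- ===== LEMMAS AND PROOFS =====

-- ---- basic 2D access facts ----

def Shape (r c : Nat) (vis : List (List Bool)) : Prop :=
  vis.length = r ∧ ∀ row ∈ vis, row.length = c

def falseCount (vis : List (List Bool)) : Nat :=
  (vis.map (fun row => row.count false)).sum

theorem lset_getD {α : Type} (l : List α) (x : α) (dflt : α) (i i' : Nat) :
    (l.set i x).getD i' dflt = if i' = i ∧ i < l.length then x else l.getD i' dflt := by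
  induction l generalizing i i' with
  | nil => simp
  | cons a t ih =>
    cases i with
    | zero => cases i' <;> simp
    | succ n =>
      cases i' with
      | zero => simp
      | succ m =>
        rw [List.set_cons_succ, List.getD_cons_succ, List.getD_cons_succ, ih]
        simp [Nat.succ_lt_succ_iff]

theorem vget_vset (vis : List (List Bool)) (i j i' j' : Nat) :
    vget (vset vis i j) i' j' =
      if i' = i ∧ i < vis.length ∧ j' = j ∧ j < (vis.getD i []).length then true
      else vget vis i' j' := by
  unfold vget vset
  rw [lset_getD]
  by_cases h1 : i' = i ∧ i < vis.length
  · rcases h1 with ⟨rfl, h2⟩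
    rw [if_pos ⟨rfl, h2⟩, lset_getD]
    by_cases h3 : j' = j ∧ j < (vis.getD i' []).length
    · rw [if_pos h3, if_pos ⟨rfl, h2, h3.1, h3.2⟩]
    · rw [if_neg h3, if_neg (by intro h; exact h3 ⟨h.2.2.1, h.2.2.2⟩)]
  · rw [if_neg h1, if_neg (by intro h; exact h1 ⟨h.1, h.2.1⟩)]

theorem shape_vset (r c : Nat) (vis : List (List Bool)) (i j : Nat)
    (h : Shape r c vis) : Shape r c (vset vis i j) := by
  obtain ⟨hl, hrow⟩ := h
  by_cases hi : i < vis.length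
  · refine ⟨by simpa [vset] using hl, ?_⟩
    intro row hm
    rcases List.mem_or_eq_of_mem_set hm with hmem | rfl
    · exact hrow _ hmem
    · rw [List.length_set]
      exact hrow _ (by rw [List.getD_eq_getElem _ _ hi]; exact List.getElem_mem hi)
  · rw [vset, List.set_eq_of_length_le (by omega)]
    exact ⟨hl, hrow⟩

theorem row_count_set (row : List Bool) (j : Nat) (hj : j < row.length)
    (hf : row.getD j false = false) :
    (row.set j true).count false + 1 = row.count false := by
  induction row generalizing j with
  | nil => simp at hj
  | cons b t ih =>
    cases j with
    | zero =>
      simp only [List.getD_cons_zero] at hf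
      subst hf
      simp [List.count_cons]
    | succ m =>
      simp only [List.getD_cons_succ] at hf
      rw [List.set_cons_succ]
      simp only [List.count_cons]
      have := ih m (by simpa using hj) hf
      omega

theorem falseCount_vset (vis : List (List Bool)) (i j : Nat)
    (hi : i < vis.length) (hj : j < (vis.getD i []).length)
    (hf : vget vis i j = false) :
    falseCount (vset vis i j) + 1 = falseCount vis := by
  induction vis generalizing i with
  | nil => simp at hi
  | cons row t ih =>
    cases i with
    | zero =>
      simp only [List.getD_cons_zero] at hj hf
      unfold vget at hf
      simp only [List.getD_cons_zero] at hf
      unfold falseCount vset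
      simp only [List.getD_cons_zero, List.set_cons_zero, List.map_cons, List.sum_cons]
      have := row_count_set row j hj hf
      omega
    | succ n =>
      simp only [List.getD_cons_succ] at hj
      have hf' : vget t n j = false := by
        unfold vget at hf ⊢; simpa using hf
      have := ih n (by simpa using hi) hj hf'
      unfold falseCount vset at this ⊢
      simp only [List.getD_cons_succ, List.set_cons_succ, List.map_cons, List.sum_cons]
      omega

theorem falseCount_le (r c : Nat) (vis : List (List Bool)) (h : Shape r c vis) :
    falseCount vis ≤ r * c := by
  obtain ⟨hl, hrow⟩ := h
  subst hl
  induction vis with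
  | nil => simp [falseCount]
  | cons row t ih =>
    unfold falseCount at *
    simp only [List.map_cons, List.sum_cons, List.length_cons]
    have h1 : row.count false ≤ c := by
      have := List.count_le_length (l := row) (a := false)
      have := hrow row (by simp)
      omega
    have h2 := ih (fun rw hm => hrow rw (by simp [hm]))
    have : (t.length + 1) * c = t.length * c + c := by ring
    omega

theorem vget_oob (r c : Nat) (vis : List (List Bool)) (h : Shape r c vis)
    (i j : Nat) (hob : ¬(i < r ∧ j < c)) : vget vis i j = false := by
  obtain ⟨hl, hrow⟩ := h
  unfold vget
  by_cases hi : i < vis.length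
  · have hrm : vis.getD i [] ∈ vis := by
      rw [List.getD_eq_getElem _ _ hi]; exact List.getElem_mem hi
    have hc : (vis.getD i []).length = c := hrow _ hrm
    have hj : c ≤ j := by by_contra hcj; exact hob ⟨by omega, by omega⟩
    rw [List.getD_eq_default (vis.getD i []) false (by omega)]
  · rw [List.getD_eq_default vis [] (by omega)]; simp

theorem vget_replicate (r c i j : Nat) :
    vget (List.replicate r (List.replicate c false)) i j = false := by
  unfold vget
  by_cases hi : i < r
  · rw [List.getD_replicate _ hi]
    by_cases hj : j < c
    · rw [List.getD_replicate _ hj]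
    · rw [List.getD_eq_default (List.replicate c false) false (by simpa using hj)]
  · rw [List.getD_eq_default _ [] (by simpa using hi)]; simp

theorem shape_replicate (r c : Nat) :
    Shape r c (List.replicate r (List.replicate c false)) := by
  constructor
  · simp
  · intro row hm
    rw [List.eq_of_mem_replicate hm]; simp

-- ---- reachability relation shared by both proofs ----

def Adj (p q : Nat × Nat) : Prop :=
  ∃ d ∈ dijs, (q.1 : Int) = p.1 + d.1 ∧ (q.2 : Int) = p.2 + d.2

def StepV (grid : List (List Int)) (r c : Nat) (v : Int) (p q : Nat × Nat) : Prop :=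
  Adj p q ∧ q.1 < r ∧ q.2 < c ∧ gval grid q.1 q.2 = v

def ReachV (grid : List (List Int)) (r c : Nat) (v : Int) : Nat × Nat → Nat × Nat → Prop :=
  Relation.ReflTransGen (StepV grid r c v)

theorem adj_symm {p q : Nat × Nat} (h : Adj p q) : Adj q p := by
  rcases h with ⟨d, hd, h1, h2⟩
  simp only [dijs, List.mem_cons, List.not_mem_nil, or_false] at hd
  rcases hd with rfl | rfl | rfl | rfl
  · exact ⟨(1, 0), by simp [dijs], by simp at h1 h2 ⊢ <;> omega, by simp at h1 h2 ⊢ <;> omega⟩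
  · exact ⟨(0, 1), by simp [dijs], by simp at h1 h2 ⊢ <;> omega, by simp at h1 h2 ⊢ <;> omega⟩
  · exact ⟨(0, -1), by simp [dijs], by simp at h1 h2 ⊢ <;> omega, by simp at h1 h2 ⊢ <;> omega⟩
  · exact ⟨(-1, 0), by simp [dijs], by simp at h1 h2 ⊢ <;> omega, by simp at h1 h2 ⊢ <;> omega⟩

theorem reach_inb {grid : List (List Int)} {r c : Nat} {v : Int} {p q : Nat × Nat}
    (h : ReachV grid r c v p q) : q = p ∨ (q.1 < r ∧ q.2 < c ∧ gval grid q.1 q.2 = v) := by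
  induction h with
  | refl => exact Or.inl rfl
  | tail _ hstep _ => exact Or.inr ⟨hstep.2.1, hstep.2.2.1, hstep.2.2.2⟩

theorem shape_row_len {r c : Nat} {vis : List (List Bool)} (h : Shape r c vis)
    {i : Nat} (hi : i < r) : (vis.getD i []).length = c := by
  obtain ⟨hl, hrow⟩ := h
  have hi' : i < vis.length := by omega
  exact hrow _ (by rw [List.getD_eq_getElem _ _ hi']; exact List.getElem_mem hi')

-- ---- one direction of A's inner loop ----

theorem floodStep_one (grid : List (List Int)) (r c : Nat) (v : Int) (i j : Nat)
    (d : Int × Int) (hd : d ∈ dijs) (vis : List (List Bool)) (st : List (Nat × Nat))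
    (hsh : Shape r c vis) :
    Shape r c (floodStep grid r c v i j (vis, st) d).1 ∧
    2 * falseCount (floodStep grid r c v i j (vis, st) d).1 +
      (floodStep grid r c v i j (vis, st) d).2.length ≤ 2 * falseCount vis + st.length ∧
    (∀ (a b : Nat), vget vis a b = true → vget (floodStep grid r c v i j (vis, st) d).1 a b = true) ∧
    (∀ (a b : Nat), vget (floodStep grid r c v i j (vis, st) d).1 a b = true →
      vget vis a b = true ∨ (StepV grid r c v (i, j) (a, b) ∧ (a, b) ∈ (floodStep grid r c v i j (vis, st) d).2)) ∧
    (∀ p ∈ st, p ∈ (floodStep grid r c v i j (vis, st) d).2) ∧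
    (∀ p ∈ (floodStep grid r c v i j (vis, st) d).2, p ∈ st ∨
      (StepV grid r c v (i, j) p ∧ vget (floodStep grid r c v i j (vis, st) d).1 p.1 p.2 = true)) ∧
    (∀ (a b : Nat), (a : Int) = i + d.1 → (b : Int) = j + d.2 → a < r → b < c →
      gval grid a b = v → vget (floodStep grid r c v i j (vis, st) d).1 a b = true) := by
  simp only [floodStep]
  split_ifs with hC
  · obtain ⟨h0, h1, h2, h3, h4, h5⟩ := hC
    have hlen : ((i : Int) + d.1).toNat < vis.length := by have := hsh.1; omega
    have hrl : (vis.getD ((i : Int) + d.1).toNat []).length = c :=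
      shape_row_len hsh (by omega)
    have hb0len : ((j : Int) + d.2).toNat < (vis.getD ((i : Int) + d.1).toNat []).length := by
      omega
    have hfc : falseCount (vset vis ((i : Int) + d.1).toNat ((j : Int) + d.2).toNat) + 1 =
        falseCount vis := falseCount_vset _ _ _ hlen hb0len h5
    have hstep : StepV grid r c v (i, j) (((i : Int) + d.1).toNat, ((j : Int) + d.2).toNat) :=
      ⟨⟨d, hd, by simp; omega, by simp; omega⟩, by simp; omega, by simp; omega, h4⟩
    have hself : vget (vset vis ((i : Int) + d.1).toNat ((j : Int) + d.2).toNat)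
        ((i : Int) + d.1).toNat ((j : Int) + d.2).toNat = true := by
      rw [vget_vset, if_pos ⟨rfl, hlen, rfl, hb0len⟩]
    have hmono : ∀ (a b : Nat), vget vis a b = true →
        vget (vset vis ((i : Int) + d.1).toNat ((j : Int) + d.2).toNat) a b = true := by
      intro a b hab
      rw [vget_vset]
      split_ifs with h
      · rfl
      · exact hab
    refine ⟨shape_vset _ _ _ _ _ hsh, ?_, hmono, ?_, ?_, ?_, ?_⟩
    · simp only [List.length_cons]; omega
    · intro a b hab
      rw [vget_vset] at hab
      split_ifs at hab with h
      · obtain ⟨rfl, -, rfl, -⟩ := h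
        exact Or.inr ⟨hstep, by simp⟩
      · exact Or.inl hab
    · intro p hp
      exact List.mem_cons_of_mem _ hp
    · intro p hp
      rcases List.mem_cons.mp hp with rfl | hp'
      · exact Or.inr ⟨hstep, hself⟩
      · exact Or.inl hp'
    · intro a b hA hB har hbc hg
      have ha' : ((i : Int) + d.1).toNat = a := by omega
      have hb' : ((j : Int) + d.2).toNat = b := by omega
      rw [← ha', ← hb']
      exact hself
  · refine ⟨hsh, by simp, fun a b h => h, fun a b h => Or.inl h,
      fun p hp => hp, fun p hp => Or.inl hp, ?_⟩
    intro a b hA hB har hbc hg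
    have ha' : ((i : Int) + d.1).toNat = a := by omega
    have hb' : ((j : Int) + d.2).toNat = b := by omega
    by_cases hv : vget vis a b = true
    · exact hv
    · exfalso
      exact hC ⟨by omega, by omega, by omega, by omega, by rw [ha', hb']; exact hg,
        by rw [ha', hb']; simpa using hv⟩

theorem floodFold (grid : List (List Int)) (r c : Nat) (v : Int) (i j : Nat)
    (ds : List (Int × Int)) (hds : ∀ d ∈ ds, d ∈ dijs) :
    ∀ (vis : List (List Bool)) (st : List (Nat × Nat)), Shape r c vis →
    Shape r c (List.foldl (floodStep grid r c v i j) (vis, st) ds).1 ∧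
    2 * falseCount (List.foldl (floodStep grid r c v i j) (vis, st) ds).1 +
      (List.foldl (floodStep grid r c v i j) (vis, st) ds).2.length ≤
      2 * falseCount vis + st.length ∧
    (∀ (a b : Nat), vget vis a b = true →
      vget (List.foldl (floodStep grid r c v i j) (vis, st) ds).1 a b = true) ∧
    (∀ (a b : Nat), vget (List.foldl (floodStep grid r c v i j) (vis, st) ds).1 a b = true →
      vget vis a b = true ∨ (StepV grid r c v (i, j) (a, b) ∧
        (a, b) ∈ (List.foldl (floodStep grid r c v i j) (vis, st) ds).2)) ∧
    (∀ p ∈ st, p ∈ (List.foldl (floodStep grid r c v i j) (vis, st) ds).2) ∧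
    (∀ p ∈ (List.foldl (floodStep grid r c v i j) (vis, st) ds).2, p ∈ st ∨
      (StepV grid r c v (i, j) p ∧
        vget (List.foldl (floodStep grid r c v i j) (vis, st) ds).1 p.1 p.2 = true)) ∧
    (∀ d ∈ ds, ∀ (a b : Nat), (a : Int) = i + d.1 → (b : Int) = j + d.2 → a < r → b < c →
      gval grid a b = v →
      vget (List.foldl (floodStep grid r c v i j) (vis, st) ds).1 a b = true) := by
  induction ds with
  | nil =>
    intro vis st hsh
    simp only [List.foldl_nil]
    exact ⟨hsh, by simp, fun a b h => h, fun a b h => Or.inl h,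
      fun p hp => hp, fun p hp => Or.inl hp, by simp⟩
  | cons d ds ih =>
    intro vis st hsh
    simp only [List.foldl_cons]
    obtain ⟨S1sh, S1m, S1mono, S1new, S1keep, S1stack, S1dir⟩ :=
      floodStep_one grid r c v i j d (hds d (by simp)) vis st hsh
    obtain ⟨S2sh, S2m, S2mono, S2new, S2keep, S2stack, S2dir⟩ :=
      ih (fun d' hd' => hds d' (by simp [hd'])) (floodStep grid r c v i j (vis, st) d).1
        (floodStep grid r c v i j (vis, st) d).2 S1sh
    rw [Prod.mk.eta] at S2sh S2m S2mono S2new S2keep S2stack S2dir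
    refine ⟨S2sh, by omega, fun a b h => S2mono a b (S1mono a b h), ?_,
      fun p hp => S2keep p (S1keep p hp), ?_, ?_⟩
    · intro a b h
      rcases S2new a b h with h2 | ⟨hs, hm2⟩
      · rcases S1new a b h2 with h1 | ⟨hs1, hm1⟩
        · exact Or.inl h1
        · exact Or.inr ⟨hs1, S2keep _ hm1⟩
      · exact Or.inr ⟨hs, hm2⟩
    · intro p hp
      rcases S2stack p hp with hp1 | ⟨hs, ht⟩
      · rcases S1stack p hp1 with hp0 | ⟨hs, ht⟩
        · exact Or.inl hp0
        · exact Or.inr ⟨hs, S2mono _ _ ht⟩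
      · exact Or.inr ⟨hs, ht⟩
    · intro d0 hd0 a b hA hB har hbc hg
      rcases List.mem_cons.mp hd0 with rfl | hd0'
      · exact S2mono a b (S1dir a b hA hB har hbc hg)
      · exact S2dir d0 hd0' a b hA hB har hbc hg

theorem floodA_spec (grid : List (List Int)) (r c : Nat) (v : Int) :
    ∀ (fuel : Nat) (vis : List (List Bool)) (stack : List (Nat × Nat)),
    Shape r c vis →
    2 * falseCount vis + stack.length ≤ fuel →
    (∀ p ∈ stack, p.1 < r ∧ p.2 < c ∧ vget vis p.1 p.2 = true) →
    (∀ (a b : Nat), a < r → b < c → vget vis a b = true → gval grid a b = v →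
      (a, b) ∈ stack ∨ ∀ q, StepV grid r c v (a, b) q → vget vis q.1 q.2 = true) →
    Shape r c (floodA grid r c v fuel vis stack) ∧
    (∀ (a b : Nat), vget vis a b = true → vget (floodA grid r c v fuel vis stack) a b = true) ∧
    (∀ (a b : Nat), vget (floodA grid r c v fuel vis stack) a b = true →
      vget vis a b = true ∨ ∃ s ∈ stack, ReachV grid r c v s (a, b)) ∧
    (∀ (a b : Nat), a < r → b < c → vget (floodA grid r c v fuel vis stack) a b = true →
      gval grid a b = v → ∀ q, StepV grid r c v (a, b) q →
        vget (floodA grid r c v fuel vis stack) q.1 q.2 = true) := by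
  intro fuel
  induction fuel with
  | zero =>
    intro vis stack hsh hm hstack hcl
    cases stack with
    | nil =>
      simp only [floodA]
      refine ⟨hsh, fun a b h => h, fun a b h => Or.inl h, ?_⟩
      intro a b ha hb ht hg q hq
      rcases hcl a b ha hb ht hg with h | h
      · simp at h
      · exact h q hq
    | cons p rest => simp only [List.length_cons] at hm; omega
  | succ fuel ih =>
    intro vis stack hsh hm hstack hcl
    cases stack with
    | nil =>
      simp only [floodA]
      refine ⟨hsh, fun a b h => h, fun a b h => Or.inl h, ?_⟩
      intro a b ha hb ht hg q hq
      rcases hcl a b ha hb ht hg with h | h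
      · simp at h
      · exact h q hq
    | cons p rest =>
      obtain ⟨i, j⟩ := p
      simp only [floodA]
      obtain ⟨F_sh, F_m, F_mono, F_new, F_keep, F_stack, F_dir⟩ :=
        floodFold grid r c v i j dijs (fun d hd => hd) vis rest hsh
      have hij := hstack (i, j) (by simp)
      have hmeas : 2 * falseCount (List.foldl (floodStep grid r c v i j) (vis, rest) dijs).1 +
          (List.foldl (floodStep grid r c v i j) (vis, rest) dijs).2.length ≤ fuel := by
        simp only [List.length_cons] at hm; omega
      have hstack' : ∀ p ∈ (List.foldl (floodStep grid r c v i j) (vis, rest) dijs).2,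
          p.1 < r ∧ p.2 < c ∧
            vget (List.foldl (floodStep grid r c v i j) (vis, rest) dijs).1 p.1 p.2 = true := by
        intro p hp
        rcases F_stack p hp with hp1 | ⟨hs, ht⟩
        · obtain ⟨h1, h2, h3⟩ := hstack p (by simp [hp1])
          exact ⟨h1, h2, F_mono _ _ h3⟩
        · exact ⟨hs.2.1, hs.2.2.1, ht⟩
      have hcl' : ∀ (a b : Nat), a < r → b < c →
          vget (List.foldl (floodStep grid r c v i j) (vis, rest) dijs).1 a b = true →
          gval grid a b = v →
          (a, b) ∈ (List.foldl (floodStep grid r c v i j) (vis, rest) dijs).2 ∨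
            ∀ q, StepV grid r c v (a, b) q →
              vget (List.foldl (floodStep grid r c v i j) (vis, rest) dijs).1 q.1 q.2 = true := by
        intro a b ha hb ht hg
        rcases F_new a b ht with hold | ⟨hs, hmem⟩
        · rcases hcl a b ha hb hold hg with hmem | hclosed
          · rcases List.mem_cons.mp hmem with heq | hmem'
            · right
              intro q hq
              obtain ⟨⟨d, hd, hq1, hq2⟩, hqr, hqc, hqv⟩ := hq
              obtain ⟨hia, hjb⟩ := Prod.mk.injEq .. ▸ heq.symm
              subst hia; subst hjb
              exact F_dir d hd q.1 q.2 hq1 hq2 hqr hqc hqv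
            · exact Or.inl (F_keep _ hmem')
          · right
            intro q hq
            exact F_mono _ _ (hclosed q hq)
        · exact Or.inl hmem
      obtain ⟨R_sh, R_mono, R_sound, R_cl⟩ := ih
        (List.foldl (floodStep grid r c v i j) (vis, rest) dijs).1
        (List.foldl (floodStep grid r c v i j) (vis, rest) dijs).2
        F_sh hmeas hstack' hcl'
      refine ⟨R_sh, fun a b h => R_mono a b (F_mono a b h), ?_, R_cl⟩
      intro a b h
      rcases R_sound a b h with h1 | ⟨s, hsm, hreach⟩
      · rcases F_new a b h1 with h0 | ⟨hs, _⟩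
        · exact Or.inl h0
        · exact Or.inr ⟨(i, j), by simp, Relation.ReflTransGen.single hs⟩
      · rcases F_stack s hsm with hsr | ⟨hs, _⟩
        · exact Or.inr ⟨s, by simp [hsr], hreach⟩
        · exact Or.inr ⟨(i, j), by simp, Relation.ReflTransGen.head hs hreach⟩

theorem flood_full (grid : List (List Int)) (r c : Nat) (v : Int)
    (vis0 : List (List Bool)) (i0 j0 : Nat)
    (hsh : Shape r c vis0) (hi0 : i0 < r) (hj0 : j0 < c) (hv0 : gval grid i0 j0 = v)
    (hnov : ∀ (a b : Nat), a < r → b < c → vget vis0 a b = true → gval grid a b ≠ v) :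
    Shape r c (floodA grid r c v (2 * r * c + 1) (vset vis0 i0 j0) [(i0, j0)]) ∧
    ∀ (a b : Nat),
      vget (floodA grid r c v (2 * r * c + 1) (vset vis0 i0 j0) [(i0, j0)]) a b = true ↔
      (vget vis0 a b = true ∨ ReachV grid r c v (i0, j0) (a, b)) := by
  have hsh1 : Shape r c (vset vis0 i0 j0) := shape_vset _ _ _ _ _ hsh
  have hlen0 : i0 < vis0.length := by have := hsh.1; omega
  have hrl0 : j0 < (vis0.getD i0 []).length := by have := shape_row_len hsh hi0; omega
  have hself : vget (vset vis0 i0 j0) i0 j0 = true := by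
    rw [vget_vset, if_pos ⟨rfl, hlen0, rfl, hrl0⟩]
  obtain ⟨Rsh, Rmono, Rsound, Rcl⟩ := floodA_spec grid r c v (2 * r * c + 1)
    (vset vis0 i0 j0) [(i0, j0)] hsh1
    (by
      have := falseCount_le r c (vset vis0 i0 j0) hsh1
      have h2 : 2 * r * c = 2 * (r * c) := by ring
      simp only [List.length_cons, List.length_nil]
      omega)
    (by
      intro p hp
      simp only [List.mem_singleton] at hp
      subst hp
      exact ⟨hi0, hj0, hself⟩)
    (by
      intro a b ha hb ht hg
      rw [vget_vset] at ht
      split_ifs at ht with h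
      · obtain ⟨rfl, -, rfl, -⟩ := h
        exact Or.inl (by simp)
      · exact absurd hg (hnov a b ha hb ht))
  refine ⟨Rsh, ?_⟩
  have key : ∀ p, ReachV grid r c v (i0, j0) p →
      vget (floodA grid r c v (2 * r * c + 1) (vset vis0 i0 j0) [(i0, j0)]) p.1 p.2 = true := by
    intro p hp
    induction hp with
    | refl => exact Rmono i0 j0 hself
    | @tail m q hr hstep ih =>
      rcases reach_inb hr with heq | ⟨hm1, hm2, hmv⟩
      · subst heq
        exact Rcl i0 j0 hi0 hj0 ih hv0 q hstep
      · exact Rcl m.1 m.2 hm1 hm2 ih hmv q (by rwa [Prod.mk.eta])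
  intro a b
  constructor
  · intro h
    rcases Rsound a b h with h1 | ⟨s, hs, hreach⟩
    · rw [vget_vset] at h1
      split_ifs at h1 with hcase
      · obtain ⟨rfl, -, rfl, -⟩ := hcase
        exact Or.inr Relation.ReflTransGen.refl
      · exact Or.inl h1
    · simp only [List.mem_singleton] at hs
      subst hs
      exact Or.inr hreach
  · intro h
    rcases h with h | h
    · refine Rmono a b ?_
      rw [vget_vset]
      split_ifs with hcase
      · rfl
      · exact h
    · exact key (a, b) h

-- ---- B's sweep/fixpoint lemmas ----

theorem passFold (grid : List (List Int)) (r c : Nat) (G : Nat × Nat → Prop)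
    (Gprop : ∀ x y, G x → y.1 < r → y.2 < c → Adj x y →
      gval grid y.1 y.2 = gval grid x.1 x.2 → G y) :
    ∀ (cs : List (Nat × Nat)), (∀ p ∈ cs, p.1 < r ∧ p.2 < c) →
    ∀ (vis : List (List Bool)) (ch : Bool), Shape r c vis →
    (∀ (a b : Nat), a < r → b < c → vget vis a b = true → G (a, b)) →
    Shape r c (List.foldl (passStep grid r c) (vis, ch) cs).1 ∧
    (∀ (a b : Nat), vget vis a b = true →
      vget (List.foldl (passStep grid r c) (vis, ch) cs).1 a b = true) ∧
    (∀ (a b : Nat), a < r → b < c →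
      vget (List.foldl (passStep grid r c) (vis, ch) cs).1 a b = true → G (a, b)) ∧
    (((List.foldl (passStep grid r c) (vis, ch) cs).1 = vis ∧
        (List.foldl (passStep grid r c) (vis, ch) cs).2 = ch) ∨
      (falseCount (List.foldl (passStep grid r c) (vis, ch) cs).1 < falseCount vis ∧
        (List.foldl (passStep grid r c) (vis, ch) cs).2 = true)) ∧
    ((List.foldl (passStep grid r c) (vis, ch) cs).2 = false →
      ∀ p ∈ cs, ¬ markCond grid r c vis p) := by
  intro cs
  induction cs with
  | nil =>
    intro _ vis ch hsh hsound
    simp only [List.foldl_nil]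
    refine ⟨hsh, fun a b h => h, hsound, ?_, ?_⟩
    · simp
    · simp
  | cons q cs ih =>
    intro hcs vis ch hsh hsound
    obtain ⟨hq1, hq2⟩ := hcs q (by simp)
    simp only [List.foldl_cons]
    by_cases hC : markCond grid r c vis q
    · -- the cell fires: it is marked and `changed` becomes true
      obtain ⟨hfalse, d, hd, h0, h1, h2, h3, hnv, hgv⟩ := hC
      have hqlen : q.1 < vis.length := by have := hsh.1; omega
      have hqrl : q.2 < (vis.getD q.1 []).length := by have := shape_row_len hsh hq1; omega
      have hT : passStep grid r c (vis, ch) q = (vset vis q.1 q.2, true) := by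
        rw [passStep, if_pos ⟨hfalse, d, hd, h0, h1, h2, h3, hnv, hgv⟩]
      rw [hT]
      have hshT : Shape r c (vset vis q.1 q.2) := shape_vset _ _ _ _ _ hsh
      have hfc : falseCount (vset vis q.1 q.2) + 1 = falseCount vis :=
        falseCount_vset _ _ _ hqlen hqrl hfalse
      have hGq : G q := by
        have hn := hsound ((q.1 : Int) + d.1).toNat ((q.2 : Int) + d.2).toNat
          (by omega) (by omega) hnv
        refine Gprop _ q hn hq1 hq2 (adj_symm ⟨d, hd, by omega, by omega⟩) hgv.symm
      have hsound' : ∀ (a b : Nat), a < r → b < c →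
          vget (vset vis q.1 q.2) a b = true → G (a, b) := by
        intro a b ha hb ht
        rw [vget_vset] at ht
        split_ifs at ht with h
        · obtain ⟨rfl, -, rfl, -⟩ := h
          simpa using hGq
        · exact hsound a b ha hb ht
      obtain ⟨Ish, Imono, Isound, Ifc, Ifix⟩ := ih (fun p hp => hcs p (by simp [hp]))
        (vset vis q.1 q.2) true hshT hsound'
      refine ⟨Ish, ?_, Isound, ?_, ?_⟩
      · intro a b h
        refine Imono a b ?_
        rw [vget_vset]
        split_ifs with h'
        · rfl
        · exact h
      · rcases Ifc with ⟨he, hc2⟩ | ⟨hlt, hc2⟩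
        · exact Or.inr ⟨by rw [he]; omega, hc2⟩
        · exact Or.inr ⟨by omega, hc2⟩
      · intro hfin
        rcases Ifc with ⟨-, hc2⟩ | ⟨-, hc2⟩ <;> rw [hc2] at hfin <;> exact absurd hfin (by simp)
    · have hT : passStep grid r c (vis, ch) q = (vis, ch) := by
        rw [passStep, if_neg hC]
      rw [hT]
      obtain ⟨Ish, Imono, Isound, Ifc, Ifix⟩ := ih (fun p hp => hcs p (by simp [hp]))
        vis ch hsh hsound
      refine ⟨Ish, Imono, Isound, Ifc, ?_⟩
      intro hfin p hp
      rcases List.mem_cons.mp hp with rfl | hp'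
      · exact hC
      · exact Ifix hfin p hp'

theorem mem_cells {r c : Nat} {p : Nat × Nat} : p ∈ cells r c ↔ p.1 < r ∧ p.2 < c := by
  obtain ⟨i, j⟩ := p
  simp [cells, List.mem_flatMap]

theorem relaxB_spec (grid : List (List Int)) (r c : Nat) (G : Nat × Nat → Prop)
    (Gprop : ∀ x y, G x → y.1 < r → y.2 < c → Adj x y →
      gval grid y.1 y.2 = gval grid x.1 x.2 → G y) :
    ∀ (fuel : Nat) (vis : List (List Bool)), Shape r c vis → falseCount vis < fuel →
    (∀ (a b : Nat), a < r → b < c → vget vis a b = true → G (a, b)) →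
    Shape r c (relaxB grid r c fuel vis) ∧
    (∀ (a b : Nat), vget vis a b = true → vget (relaxB grid r c fuel vis) a b = true) ∧
    (∀ (a b : Nat), a < r → b < c → vget (relaxB grid r c fuel vis) a b = true → G (a, b)) ∧
    (∀ p : Nat × Nat, p.1 < r → p.2 < c →
      ¬ markCond grid r c (relaxB grid r c fuel vis) p) := by
  intro fuel
  induction fuel with
  | zero => intro vis _ hm; omega
  | succ fuel ih =>
    intro vis hsh hm hsound
    simp only [relaxB]
    obtain ⟨Fsh, Fmono, Fsound, Ffc, Ffix⟩ := passFold grid r c G Gprop (cells r c)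
      (fun p hp => mem_cells.mp hp) vis false hsh hsound
    cases hF2 : (List.foldl (passStep grid r c) (vis, false) (cells r c)).2 with
    | true =>
      rw [if_pos rfl]
      have hlt : falseCount (List.foldl (passStep grid r c) (vis, false) (cells r c)).1 <
          falseCount vis := by
        rcases Ffc with ⟨-, hc2⟩ | ⟨hlt, -⟩
        · rw [hF2] at hc2; exact absurd hc2 (by simp)
        · exact hlt
      obtain ⟨Rsh, Rmono, Rsound, Rfix⟩ := ih
        (List.foldl (passStep grid r c) (vis, false) (cells r c)).1 Fsh (by omega) Fsound
      exact ⟨Rsh, fun a b h => Rmono a b (Fmono a b h), Rsound, Rfix⟩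
    | false =>
      rw [if_neg (by simp)]
      have hFe : (List.foldl (passStep grid r c) (vis, false) (cells r c)).1 = vis := by
        rcases Ffc with ⟨he, -⟩ | ⟨-, hc2⟩
        · exact he
        · rw [hF2] at hc2; exact absurd hc2 (by simp)
      rw [hFe]
      refine ⟨hsh, fun a b h => h, hsound, ?_⟩
      intro p hp1 hp2
      exact Ffix hF2 p (mem_cells.mpr ⟨hp1, hp2⟩)

-- ---- final visited-set characterizations of both algorithms ----

theorem twoFlood_char (grid : List (List Int)) (r c : Nat) (v1 v2 : Int)
    (i1 j1 i2 j2 : Nat)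
    (h11 : i1 < r) (h12 : j1 < c) (h21 : i2 < r) (h22 : j2 < c)
    (hv1 : gval grid i1 j1 = v1) (hv2 : gval grid i2 j2 = v2) (hne : v1 ≠ v2) :
    Shape r c (floodA grid r c v2 (2 * r * c + 1)
      (vset (floodA grid r c v1 (2 * r * c + 1)
        (vset (List.replicate r (List.replicate c false)) i1 j1) [(i1, j1)]) i2 j2)
      [(i2, j2)]) ∧
    ∀ (a b : Nat),
      vget (floodA grid r c v2 (2 * r * c + 1)
        (vset (floodA grid r c v1 (2 * r * c + 1)
          (vset (List.replicate r (List.replicate c false)) i1 j1) [(i1, j1)]) i2 j2)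
        [(i2, j2)]) a b = true ↔
      (ReachV grid r c v1 (i1, j1) (a, b) ∨ ReachV grid r c v2 (i2, j2) (a, b)) := by
  obtain ⟨S1, C1⟩ := flood_full grid r c v1 (List.replicate r (List.replicate c false))
    i1 j1 (shape_replicate r c) h11 h12 hv1
    (by intro a b _ _ ht; rw [vget_replicate] at ht; exact absurd ht (by simp))
  have C1' : ∀ (a b : Nat),
      vget (floodA grid r c v1 (2 * r * c + 1)
        (vset (List.replicate r (List.replicate c false)) i1 j1) [(i1, j1)]) a b = true ↔
      ReachV grid r c v1 (i1, j1) (a, b) := by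
    intro a b
    rw [C1 a b, vget_replicate]
    simp
  obtain ⟨S2, C2⟩ := flood_full grid r c v2 _ i2 j2 S1 h21 h22 hv2
    (by
      intro a b ha hb ht
      have hreach := (C1' a b).mp ht
      rcases reach_inb hreach with heq | ⟨-, -, hval⟩
      · have : gval grid a b = v1 := by
          have h1 : a = i1 := congrArg Prod.fst heq
          have h2 : b = j1 := congrArg Prod.snd heq
          rw [h1, h2, hv1]
        rw [this]; exact fun h => hne h
      · rw [hval]; exact fun h => hne h)
  refine ⟨S2, ?_⟩
  intro a b
  rw [C2 a b, C1' a b]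

theorem relax_char (grid : List (List Int)) (r c : Nat) (v1 v2 : Int)
    (i1 j1 i2 j2 : Nat)
    (h11 : i1 < r) (h12 : j1 < c) (h21 : i2 < r) (h22 : j2 < c)
    (hv1 : gval grid i1 j1 = v1) (hv2 : gval grid i2 j2 = v2) :
    Shape r c (relaxB grid r c (r * c + 1)
      (vset (vset (List.replicate r (List.replicate c false)) i1 j1) i2 j2)) ∧
    ∀ (a b : Nat),
      vget (relaxB grid r c (r * c + 1)
        (vset (vset (List.replicate r (List.replicate c false)) i1 j1) i2 j2)) a b = true ↔
      (ReachV grid r c v1 (i1, j1) (a, b) ∨ ReachV grid r c v2 (i2, j2) (a, b)) := by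
  have hvalreach : ∀ (w : Int) (s p : Nat × Nat), gval grid s.1 s.2 = w →
      ReachV grid r c w s p → gval grid p.1 p.2 = w := by
    intro w s p hs hr
    rcases reach_inb hr with rfl | ⟨-, -, hval⟩
    · exact hs
    · exact hval
  have Gprop : ∀ x y, (ReachV grid r c v1 (i1, j1) x ∨ ReachV grid r c v2 (i2, j2) x) →
      y.1 < r → y.2 < c → Adj x y → gval grid y.1 y.2 = gval grid x.1 x.2 →
      (ReachV grid r c v1 (i1, j1) y ∨ ReachV grid r c v2 (i2, j2) y) := by
    intro x y hx hy1 hy2 hadj hgv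
    rcases hx with hx | hx
    · have hxv : gval grid x.1 x.2 = v1 := hvalreach v1 _ _ hv1 hx
      exact Or.inl (hx.tail ⟨hadj, hy1, hy2, by rw [hgv, hxv]⟩)
    · have hxv : gval grid x.1 x.2 = v2 := hvalreach v2 _ _ hv2 hx
      exact Or.inr (hx.tail ⟨hadj, hy1, hy2, by rw [hgv, hxv]⟩)
  have hsh0 : Shape r c (vset (List.replicate r (List.replicate c false)) i1 j1) :=
    shape_vset _ _ _ _ _ (shape_replicate r c)
  have hsh1 : Shape r c (vset (vset (List.replicate r (List.replicate c false)) i1 j1) i2 j2) :=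
    shape_vset _ _ _ _ _ hsh0
  have hseed1 : vget (vset (vset (List.replicate r (List.replicate c false)) i1 j1) i2 j2)
      i1 j1 = true := by
    rw [vget_vset]
    split_ifs with h
    · rfl
    · rw [vget_vset, if_pos ⟨rfl, by have := (shape_replicate r c).1; omega,
        rfl, by have := shape_row_len (shape_replicate r c) h11; omega⟩]
  have hseed2 : vget (vset (vset (List.replicate r (List.replicate c false)) i1 j1) i2 j2)
      i2 j2 = true := by
    rw [vget_vset, if_pos ⟨rfl, by have := hsh0.1; omega,
      rfl, by have := shape_row_len hsh0 h21; omega⟩]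
  obtain ⟨Rsh, Rmono, Rsound, Rfix⟩ := relaxB_spec grid r c _ Gprop (r * c + 1)
    (vset (vset (List.replicate r (List.replicate c false)) i1 j1) i2 j2) hsh1
    (by have := falseCount_le r c _ hsh1; omega)
    (by
      intro a b ha hb ht
      rw [vget_vset] at ht
      split_ifs at ht with h2
      · obtain ⟨rfl, -, rfl, -⟩ := h2
        exact Or.inr Relation.ReflTransGen.refl
      · rw [vget_vset] at ht
        split_ifs at ht with h1
        · obtain ⟨rfl, -, rfl, -⟩ := h1
          exact Or.inl Relation.ReflTransGen.refl
        · rw [vget_replicate] at ht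
          exact absurd ht (by simp))
  refine ⟨Rsh, ?_⟩
  have key : ∀ (w : Int) (s : Nat × Nat), s.1 < r → s.2 < c → gval grid s.1 s.2 = w →
      vget (relaxB grid r c (r * c + 1)
        (vset (vset (List.replicate r (List.replicate c false)) i1 j1) i2 j2)) s.1 s.2 = true →
      ∀ p, ReachV grid r c w s p →
      vget (relaxB grid r c (r * c + 1)
        (vset (vset (List.replicate r (List.replicate c false)) i1 j1) i2 j2)) p.1 p.2 = true := by
    intro w s hs1 hs2 hsv hst p hp
    induction hp with
    | refl => exact hst
    | @tail m q hr' hstep ih =>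
      obtain ⟨hadj, hq1, hq2, hqv⟩ := hstep
      by_cases hvq : vget (relaxB grid r c (r * c + 1)
          (vset (vset (List.replicate r (List.replicate c false)) i1 j1) i2 j2)) q.1 q.2 = true
      · exact hvq
      · exfalso
        have hm : m.1 < r ∧ m.2 < c ∧ gval grid m.1 m.2 = w := by
          rcases reach_inb hr' with rfl | ⟨a1, a2, a3⟩
          · exact ⟨hs1, hs2, hsv⟩
          · exact ⟨a1, a2, a3⟩
        obtain ⟨hm1, hm2, hmv⟩ := hm
        obtain ⟨d', hd', he1, he2⟩ := adj_symm hadj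
        have e1 : ((q.1 : Int) + d'.1).toNat = m.1 := by omega
        have e2 : ((q.2 : Int) + d'.2).toNat = m.2 := by omega
        refine Rfix q hq1 hq2 ⟨by simpa using hvq, d', hd', by omega, by omega, by omega,
          by omega, ?_, ?_⟩
        · rw [e1, e2]; exact ih
        · rw [e1, e2, hmv, hqv]
  intro a b
  constructor
  · intro h
    by_cases hb : a < r ∧ b < c
    · exact Rsound a b hb.1 hb.2 h
    · rw [vget_oob r c _ Rsh a b hb] at h
      exact absurd h (by simp)
  · intro h
    rcases h with h | h
    · exact key v1 (i1, j1) h11 h12 hv1 (Rmono _ _ hseed1) (a, b) h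
    · exact key v2 (i2, j2) h21 h22 hv2 (Rmono _ _ hseed2) (a, b) h

-- ---- glue: grid header, border dict, all-true check ----

theorem allTrue_iff (r c : Nat) (u : List (List Bool)) (hu : Shape r c u) :
    ((u.all fun row => row.all id) = true ↔
      ∀ (a b : Nat), a < r → b < c → vget u a b = true) := by
  rw [List.all_eq_true]
  constructor
  · intro h a b ha hb
    have hau : a < u.length := by have := hu.1; omega
    have hrow : u.getD a [] ∈ u := by
      rw [List.getD_eq_getElem _ _ hau]; exact List.getElem_mem hau
    have hrl : (u.getD a []).length = c := shape_row_len hu ha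
    have hb' : b < (u.getD a []).length := by omega
    have hxm : (u.getD a []).getD b false ∈ u.getD a [] := by
      rw [List.getD_eq_getElem _ _ hb']; exact List.getElem_mem hb'
    have h2 := h _ hrow
    rw [List.all_eq_true] at h2
    have h3 := h2 _ hxm
    unfold vget
    simpa using h3
  · intro h row hrow
    rw [List.all_eq_true]
    intro x hx
    obtain ⟨a, hau, heq⟩ := List.mem_iff_getElem.mp hrow
    obtain ⟨b, hbl, hxeq⟩ := List.mem_iff_getElem.mp hx
    have hrl : row.length = c := hu.2 row hrow
    have hv : vget u a b = true := h a b (by have := hu.1; omega) (by omega)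
    unfold vget at hv
    rw [List.getD_eq_getElem _ _ hau, heq, List.getD_eq_getElem _ _ hbl, hxeq] at hv
    simpa using hv

theorem allTrue_congr (r c : Nat) (u w : List (List Bool))
    (hu : Shape r c u) (hw : Shape r c w)
    (h : ∀ (a b : Nat), vget u a b = vget w a b) :
    (u.all fun row => row.all id) = (w.all fun row => row.all id) := by
  by_cases hc : ∀ (a b : Nat), a < r → b < c → vget u a b = true
  · rw [(allTrue_iff r c u hu).mpr hc,
      (allTrue_iff r c w hw).mpr (fun a b ha hb => (h a b).symm.trans (hc a b ha hb))]
  · have h1 : ¬((u.all fun row => row.all id) = true) := fun hh =>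
      hc ((allTrue_iff r c u hu).mp hh)
    have h2 : ¬((w.all fun row => row.all id) = true) := fun hh =>
      hc (fun a b ha hb => (h a b).trans ((allTrue_iff r c w hw).mp hh a b ha hb))
    rw [Bool.not_eq_true] at h1 h2
    rw [h1, h2]

theorem foldl_insert_mem (grid : List (List Int)) (Q : Int → Nat × Nat → Prop) :
    ∀ (l : List (Nat × Nat)) (d : PySem.Dict Int (Nat × Nat)),
    (∀ kp ∈ d.items, Q kp.1 kp.2) → (∀ x ∈ l, Q (gval grid x.1 x.2) x) →
    ∀ kp ∈ (List.foldl (fun d p => d.insert (gval grid p.1 p.2) p) d l).items, Q kp.1 kp.2 := by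
  intro l
  induction l with
  | nil => intro d hd _ kp hkp; exact hd kp hkp
  | cons x l ih =>
    intro d hd hl kp hkp
    simp only [List.foldl_cons] at hkp
    refine ih _ ?_ (fun y hy => hl y (by simp [hy])) kp hkp
    intro kp' hkp'
    rcases (PySem.Dict.mem_items_insert _ _ _ _).mp hkp' with rfl | ⟨hmem, -⟩
    · exact hl x (by simp)
    · exact hd _ hmem

theorem possOf_mem (grid : List (List Int)) (coords : List (Nat × Nat)) :
    ∀ kp ∈ (possOf grid coords).items, kp.2 ∈ coords ∧ kp.1 = gval grid kp.2.1 kp.2.2 := by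
  unfold possOf
  exact foldl_insert_mem grid (fun k p => p ∈ coords ∧ k = gval grid p.1 p.2) coords
    PySem.Dict.empty (by intro kp h; simp [PySem.Dict.empty, PySem.Dict.items] at h)
    (fun x hx => ⟨hx, rfl⟩)

theorem possOf_nodup (grid : List (List Int)) (coords : List (Nat × Nat)) :
    (possOf grid coords).keys.Nodup := by
  unfold possOf
  exact PySem.Dict.nodup_keys_foldl_insert_key coords (fun p => gval grid p.1 p.2)
    (fun _ p => p) PySem.Dict.empty PySem.Dict.nodup_keys_empty

theorem mem_borderA (r c : Nat) (hr : 0 < r) (hc : 0 < c) :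
    ∀ p ∈ borderA r c, p.1 < r ∧ p.2 < c := by
  intro p hp
  simp only [borderA, List.mem_append, List.mem_flatMap, List.mem_range] at hp
  rcases hp with ⟨i, hi, hp⟩ | ⟨j, hj, hp⟩ <;>
    simp only [List.mem_cons, List.not_mem_nil, or_false] at hp
  · rcases hp with rfl | rfl
    · exact ⟨hi, hc⟩
    · exact ⟨hi, by omega⟩
  · rcases hp with rfl | rfl
    · exact ⟨hr, hj⟩
    · exact ⟨by omega, hj⟩

theorem foldl_flatMap' {α β γ : Type} (g : α → List β) (f : γ → β → γ) :
    ∀ (l : List α) (init : γ),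
    List.foldl f init (l.flatMap g) =
      List.foldl (fun acc x => List.foldl f acc (g x)) init l := by
  intro l
  induction l with
  | nil => intro init; simp
  | cons x l ih =>
    intro init
    rw [List.flatMap_cons, List.foldl_append, List.foldl_cons, ih]

theorem possB_eq (grid : List (List Int)) (r c : Nat) :
    possB grid r c = possOf grid (borderA r c) := by
  unfold possB possOf borderA
  rw [List.foldl_append, foldl_flatMap', foldl_flatMap']

theorem setOfList_const (l : List Nat) (a : Nat) (hne : l ≠ []) (hall : ∀ x ∈ l, x = a) :
    PySem.Set.ofList l = [a] := by
  have haux : ∀ (t : List Nat), (∀ y ∈ t, y = a) →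
      List.foldl PySem.Set.add [a] t = [a] := by
    intro t
    induction t with
    | nil => intro _; simp
    | cons y t ih =>
      intro h
      have hy : y = a := h y (by simp)
      subst hy
      rw [List.foldl_cons]
      have hadd : PySem.Set.add [y] y = [y] := by
        simp [PySem.Set.add, PySem.Set.contains]
      rw [hadd]
      exact ih (fun z hz => h z (by simp [hz]))
  cases l with
  | nil => simp at hne
  | cons x t =>
    have hx : x = a := hall x (by simp)
    subst hx
    have h1 : PySem.Set.ofList (x :: t) = List.foldl PySem.Set.add (PySem.Set.add PySem.Set.empty x) t := by
      rw [PySem.Set.ofList]; rw [List.foldl_cons]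
    rw [h1]
    have h2 : PySem.Set.add (PySem.Set.empty : PySem.Set Nat) x = [x] := by
      simp [PySem.Set.add, PySem.Set.contains, PySem.Set.empty]
    rw [h2]
    exact haux t (fun z hz => hall z (by simp [hz]))

-- ===== VERDICT (by name: the statement is the Claim_ definition above) =====
theorem cutc_spec : Claim_equal_cutc := by
  intro grid _ hpre
  obtain ⟨hr, hc0, hrows⟩ := hpre
  unfold Spec_cutc
  have hof : PySem.Set.ofList (grid.map (fun row => row.length)) =
      [(grid.headD []).length] := by
    apply setOfList_const
    · simp only [ne_eq, List.map_eq_nil_iff]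
      intro h
      rw [h] at hr
      simp at hr
    · intro x hx
      simp only [List.mem_map] at hx
      obtain ⟨row, hrow, rfl⟩ := hx
      exact hrows row hrow
  simp only [cutc, cutc_alt, hof, possB_eq]
  rw [dif_pos (by simp)]
  simp only [List.headD_cons]
  set r := grid.length with hrdef
  set c := (grid.headD []).length with hcdef
  by_cases hsz : (possOf grid (borderA r c)).size = 2
  · have hcond : ¬((possOf grid (borderA r c)).size ≠ 2) := by simp [hsz]
    rw [if_neg hcond, if_neg hcond]
    have hlen : (possOf grid (borderA r c)).items.length = 2 := hsz
    rcases hit : (possOf grid (borderA r c)).items with _ | ⟨⟨v1, q1⟩, rest⟩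
    · rw [hit] at hlen; simp at hlen
    rcases rest with _ | ⟨⟨v2, q2⟩, rest2⟩
    · rw [hit] at hlen; simp at hlen
    rcases rest2 with _ | ⟨x, rest3⟩
    swap
    · rw [hit] at hlen; simp at hlen
    have hmem := possOf_mem grid (borderA r c)
    rw [hit] at hmem
    have h1 := hmem (v1, q1) (by simp)
    have h2 := hmem (v2, q2) (by simp)
    obtain ⟨hq1m, hv1e⟩ := h1
    obtain ⟨hq2m, hv2e⟩ := h2
    obtain ⟨hq11, hq12⟩ := mem_borderA r c hr hc0 q1 hq1m
    obtain ⟨hq21, hq22⟩ := mem_borderA r c hr hc0 q2 hq2m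
    have hnd := possOf_nodup grid (borderA r c)
    rw [PySem.Dict.keys, hit] at hnd
    simp only [List.map_cons, List.map_nil, List.nodup_cons, List.mem_singleton,
      List.not_mem_nil, not_false_iff, List.nodup_nil, and_true] at hnd
    have hne : v1 ≠ v2 := hnd
    simp only [List.foldl_cons, List.foldl_nil, PySem.Dict.values, hit, List.map_cons,
      List.map_nil]
    obtain ⟨ShA, ChA⟩ := twoFlood_char grid r c v1 v2 q1.1 q1.2 q2.1 q2.2
      hq11 hq12 hq21 hq22 hv1e.symm hv2e.symm hne
    obtain ⟨ShB, ChB⟩ := relax_char grid r c v1 v2 q1.1 q1.2 q2.1 q2.2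
      hq11 hq12 hq21 hq22 hv1e.symm hv2e.symm
    have hpt : ∀ (a b : Nat),
        vget (floodA grid r c v2 (2 * r * c + 1)
          (vset (floodA grid r c v1 (2 * r * c + 1)
            (vset (List.replicate r (List.replicate c false)) q1.1 q1.2) [(q1.1, q1.2)])
            q2.1 q2.2) [(q2.1, q2.2)]) a b =
        vget (relaxB grid r c (r * c + 1)
          (vset (vset (List.replicate r (List.replicate c false)) q1.1 q1.2) q2.1 q2.2)) a b := by
      intro a b
      exact Bool.eq_iff_iff.mpr ((ChA a b).trans (ChB a b).symm)
    have hall := allTrue_congr r c _ _ ShA ShB hpt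
    simp only [hall]
  · have hcond : (possOf grid (borderA r c)).size ≠ 2 := hsz
    rw [if_pos hcond, if_pos hcond]
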